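-- pv_equiv track=rewrite | github.com/Matt8198/Projet | Phaser/trash.py | portee
-- ===== SOURCE A (Python) =====
-- def portee(longueur, centre):
--     L = []
--     c_lig, c_col = centre[0], centre[1]
--     for i in range(1, longueur + 1):
--         if c_lig + (i - 1) >= 0 and c_col >= 0:
--             L.append([c_lig + (i - 1), c_col])
--         for j in range(1, longueur - i + 1):
--             if c_lig + (i - 1) >= 0 and c_col - j >= 0:
--                 L.append([c_lig + (i - 1), c_col - j])
--             if c_lig + (i - 1) >= 0 and c_col + j >= 0:
--                 L.append([c_lig + (i - 1), c_col + j])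
--
--     for pos in L:
--         i, j = pos
--         if i > c_lig:
--             if c_lig - (i - c_lig) >= 0 and j >= 0:
--                 L.append([c_lig - (i - c_lig), j])
--     return L
-- ===== SOURCE B (Python) =====
-- def interleave(a, b):
--     if not a:
--         return b
--     return [a[0]] + interleave(b, a[1:])
--
--
-- def portee(longueur, centre):
--     c_lig, c_col = centre[0], centre[1]
--     L = []
--     M = []
--     for i in range(1, longueur + 1):
--         row = c_lig + i - 1
--         if row < 0:
--             continue
--         k = longueur - i
--         left = list(range(c_col - 1, max(c_col - k - 1, -1), -1))
--         right = list(range(max(c_col + 1, 0), c_col + k + 1))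
--         cols = ([c_col] if c_col >= 0 else []) + interleave(left, right)
--         L += [[row, c] for c in cols]
--         m = 2 * c_lig - row
--         if row > c_lig and m >= 0:
--             M += [[m, c] for c in cols]
--     return L + M
-- ===== Notes on version B (the rewrite author's own statement) =====
-- stated objective: alternative
-- what changed: B replaces A's guarded cell-by-cell appends and second pass over the mutating list by direct range arithmetic: for each row it materialises the admissible left and right column ranges as two arithmetic ranges (the >=0 guards become range endpoints via max), merges them with a recursive interleave, and emits the whole row block and, when the row lies below the centre, its whole mirror block at once; the result is the row blocks followed by the mirror blocks.
import Mathlib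
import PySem

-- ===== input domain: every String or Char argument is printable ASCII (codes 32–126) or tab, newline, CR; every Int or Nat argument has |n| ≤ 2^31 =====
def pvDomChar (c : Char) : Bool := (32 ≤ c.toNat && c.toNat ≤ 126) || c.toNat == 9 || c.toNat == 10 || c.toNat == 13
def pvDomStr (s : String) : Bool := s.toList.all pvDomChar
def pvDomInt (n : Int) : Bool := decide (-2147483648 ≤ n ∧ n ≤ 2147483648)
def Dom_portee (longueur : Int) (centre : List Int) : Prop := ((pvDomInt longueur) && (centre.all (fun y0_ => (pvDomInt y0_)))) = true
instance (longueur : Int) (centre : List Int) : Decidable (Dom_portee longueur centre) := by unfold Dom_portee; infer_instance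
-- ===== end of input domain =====

-- B builds each row's admissible columns as two arithmetic ranges merged by interleaving and emits row and mirror blocks wholesale; return value only.

-- ===== PORT A =====
-- body of A's inner 'for j' loop
def pvStepAJ (c_lig c_col i : Int) (L : List (List Int)) (j : Int) : List (List Int) :=
  let L1 := if c_lig + (i - 1) ≥ 0 ∧ c_col - j ≥ 0 then L ++ [[c_lig + (i - 1), c_col - j]] else L
  if c_lig + (i - 1) ≥ 0 ∧ c_col + j ≥ 0 then L1 ++ [[c_lig + (i - 1), c_col + j]] else L1

-- body of A's outer 'for i' loop
def pvStepAI (longueur c_lig c_col : Int) (L : List (List Int)) (i : Int) : List (List Int) :=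
  let L1 := if c_lig + (i - 1) ≥ 0 ∧ c_col ≥ 0 then L ++ [[c_lig + (i - 1), c_col]] else L
  (PySem.List.pyRange 1 (longueur - i + 1) 1).foldl (pvStepAJ c_lig c_col i) L1

-- A's second loop 'for pos in L' iterates a list that grows while being iterated;
-- ported by index with fuel 2*|L|+1 (proved sufficient below, since appended rows never re-trigger)
def pvLoop2 (c_lig : Int) : Nat → Nat → List (List Int) → List (List Int)
  | 0, _, L => L
  | fuel + 1, idx, L =>
    match L[idx]? with
    | none => L
    | some pos =>
      match pos with
      | [i, j] =>
        if i > c_lig ∧ c_lig - (i - c_lig) ≥ 0 ∧ j ≥ 0 then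
          pvLoop2 c_lig fuel (idx + 1) (L ++ [[c_lig - (i - c_lig), j]])
        else
          pvLoop2 c_lig fuel (idx + 1) L
      | _ => L  -- 'i, j = pos' would raise here; unreachable (every element of L is a pair)

def portee (longueur : Int) (centre : List Int) : List (List Int) :=
  match PySem.List.pyGet? centre 0, PySem.List.pyGet? centre 1 with
  | some c_lig, some c_col =>
    let L := (PySem.List.pyRange 1 (longueur + 1) 1).foldl (pvStepAI longueur c_lig c_col) []
    pvLoop2 c_lig (2 * L.length + 1) 0 L
  | _, _ => []  -- IndexError in Python; excluded by Pre_

-- ===== PORT B =====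
-- Source B's recursive interleave: first of a, then interleave(b, rest of a)
def pvInterleave (a b : List Int) : List Int :=
  match a with
  | [] => b
  | x :: t => x :: pvInterleave b t
termination_by a.length + b.length
decreasing_by simp; omega

-- body of Source B's 'for i' loop on the state (L, M)
def pvStepB (longueur c_lig c_col : Int) (s : List (List Int) × List (List Int)) (i : Int) :
    List (List Int) × List (List Int) :=
  let row := c_lig + i - 1
  if row < 0 then s
  else
    let k := longueur - i
    let left := PySem.List.pyRange (c_col - 1) (max (c_col - k - 1) (-1)) (-1)
    let right := PySem.List.pyRange (max (c_col + 1) 0) (c_col + k + 1) 1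
    let cols := (if c_col ≥ 0 then [c_col] else []) ++ pvInterleave left right
    let L := s.1 ++ cols.map (fun cc => [row, cc])
    let m := 2 * c_lig - row
    let M := if row > c_lig ∧ m ≥ 0 then s.2 ++ cols.map (fun cc => [m, cc]) else s.2
    (L, M)

def portee_alt (longueur : Int) (centre : List Int) : List (List Int) :=
  match PySem.List.pyGet? centre 0 with
  | none => []  -- IndexError in Python; excluded by Pre_
  | some c_lig =>
    match PySem.List.pyGet? centre 1 with
    | none => []  -- IndexError in Python; excluded by Pre_
    | some c_col =>
      let s := (PySem.List.pyRange 1 (longueur + 1) 1).foldl (pvStepB longueur c_lig c_col) ([], [])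
      s.1 ++ s.2

-- ===== PRECONDITION & SPEC =====
-- Pre_ excludes exactly the inputs where Python A raises IndexError on centre[0]/centre[1]
def Pre_portee (longueur : Int) (centre : List Int) : Prop := 2 ≤ centre.length
instance (longueur : Int) (centre : List Int) : Decidable (Pre_portee longueur centre) := by unfold Pre_portee; infer_instance
def pvWitness_portee : Int × List Int := (3, [1, 2])

def Spec_portee (longueur : Int) (centre : List Int) (out : List (List Int)) : Prop := out = portee_alt longueur centre
instance (longueur : Int) (centre : List Int) (out : List (List Int)) : Decidable (Spec_portee longueur centre out) := by unfold Spec_portee; infer_instance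

-- ===== CLAIM (what is proved, stated in full; the proofs are below) =====
def Claim_equal_portee : Prop := ∀ (longueur : Int) (centre : List Int), Dom_portee longueur centre → Pre_portee longueur centre → Spec_portee longueur centre (portee longueur centre)

-- ===== LEMMAS AND PROOFS =====

-- the mirror positions a single emitted position contributes in A's second pass
def pvMirrorsOf (c : Int) (pos : List Int) : List (List Int) :=
  match pos with
  | [a, b] => if a > c ∧ c - (a - c) ≥ 0 ∧ b ≥ 0 then [[c - (a - c), b]] else []
  | _ => []

def pvMirrors (c : Int) (L : List (List Int)) : List (List Int) := L.flatMap (pvMirrorsOf c)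

def pvShape (L : List (List Int)) : Prop := ∀ p ∈ L, ∃ a b : Int, p = [a, b]

theorem pvMirrors_append (c : Int) (L1 L2 : List (List Int)) :
    pvMirrors c (L1 ++ L2) = pvMirrors c L1 ++ pvMirrors c L2 := by
  simp [pvMirrors]

theorem pvMirrorsOf_pair (c a b : Int) :
    pvMirrorsOf c [a, b] = if a > c ∧ c - (a - c) ≥ 0 ∧ b ≥ 0 then [[c - (a - c), b]] else [] :=
  rfl

theorem pvMirrorsOf_mirror (c a b : Int) (ha : a > c) :
    pvMirrorsOf c [c - (a - c), b] = [] := by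
  rw [pvMirrorsOf_pair]
  exact if_neg (by intro h; omega)

theorem pvMirrors_length_le (c : Int) (L : List (List Int)) :
    (pvMirrors c L).length ≤ L.length := by
  induction L with
  | nil => simp [pvMirrors]
  | cons p L ih =>
    have : (pvMirrorsOf c p).length ≤ 1 := by
      unfold pvMirrorsOf
      split <;> try simp
      split <;> simp
    simp only [pvMirrors, List.flatMap_cons, List.length_append, List.length_cons]
    have := ih
    simp only [pvMirrors] at this
    omega

theorem pvShape_append_pair (L : List (List Int)) (a b : Int) (h : pvShape L) :
    pvShape (L ++ [[a, b]]) := by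
  intro p hp
  rcases List.mem_append.mp hp with h1 | h1
  · exact h p h1
  · exact ⟨a, b, by simpa using h1⟩

theorem pvShape_append_map (L : List (List Int)) (row : Int) (cols : List Int) (h : pvShape L) :
    pvShape (L ++ cols.map (fun cc => [row, cc])) := by
  intro p hp
  rcases List.mem_append.mp hp with h1 | h1
  · exact h p h1
  · obtain ⟨cc, _, rfl⟩ := List.mem_map.mp h1
    exact ⟨row, cc, rfl⟩

-- one unfolding step of A's second loop at a pair element
theorem pvLoop2_step (c : Int) (f idx : Nat) (L : List (List Int)) (a b : Int)
    (h : L[idx]? = some [a, b]) :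
    pvLoop2 c (f + 1) idx L =
      if a > c ∧ c - (a - c) ≥ 0 ∧ b ≥ 0 then pvLoop2 c f (idx + 1) (L ++ [[c - (a - c), b]])
      else pvLoop2 c f (idx + 1) L := by
  rw [pvLoop2, h]

theorem pvLoop2_stop (c : Int) (f idx : Nat) (L : List (List Int))
    (h : L[idx]? = none) : pvLoop2 c (f + 1) idx L = L := by
  rw [pvLoop2, h]

-- Phase-2 walk over pair elements none of which trigger a mirror
theorem pvLoop2_done (c : Int) :
    ∀ (acc pre : List (List Int)) (fuel : Nat),
      pvShape acc → pvMirrors c acc = [] → acc.length + 1 ≤ fuel →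
      pvLoop2 c fuel pre.length (pre ++ acc) = pre ++ acc := by
  intro acc
  induction acc with
  | nil =>
    intro pre fuel _ _ hf
    obtain ⟨f, rfl⟩ : ∃ f, fuel = f + 1 := ⟨fuel - 1, by omega⟩
    exact pvLoop2_stop c f pre.length (pre ++ []) (by simp)
  | cons x acc ih =>
    intro pre fuel hsh hm hf
    obtain ⟨f, rfl⟩ : ∃ f, fuel = f + 1 := ⟨fuel - 1, by omega⟩
    obtain ⟨a, b, rfl⟩ := hsh _ List.mem_cons_self
    have hget : (pre ++ [a, b] :: acc)[pre.length]? = some [a, b] := by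
      rw [List.getElem?_append_right (by omega)]
      simp
    have hm' : pvMirrorsOf c [a, b] = [] ∧ pvMirrors c acc = [] := by
      have h := hm
      simp only [pvMirrors, List.flatMap_cons, List.append_eq_nil_iff] at h
      exact ⟨h.1, h.2⟩
    have hcond : ¬ (a > c ∧ c - (a - c) ≥ 0 ∧ b ≥ 0) := by
      intro hcnd
      have h1 := hm'.1
      rw [pvMirrorsOf_pair, if_pos hcnd] at h1
      exact List.cons_ne_nil _ _ h1
    rw [pvLoop2_step c f pre.length _ a b hget, if_neg hcond]
    have h := ih (pre ++ [[a, b]]) f (fun p hp => hsh p (List.mem_cons_of_mem _ hp)) hm'.2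
      (by simp only [List.length_cons] at hf; omega)
    simpa using h

-- Phase-2 main invariant: processing 'rest' (all pairs) with already-appended mirrors 'acc'
theorem pvLoop2_spec (c : Int) :
    ∀ (rest pre acc : List (List Int)) (fuel : Nat),
      pvShape rest → pvShape acc →
      pvMirrors c acc = [] →
      rest.length + (pvMirrors c rest).length + acc.length + 1 ≤ fuel →
      pvLoop2 c fuel pre.length (pre ++ rest ++ acc) = pre ++ rest ++ acc ++ pvMirrors c rest := by
  intro rest
  induction rest with
  | nil =>
    intro pre acc fuel _ hshacc hacc hf
    simpa [pvMirrors] using pvLoop2_done c acc pre fuel hshacc hacc (by omega)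
  | cons x rest ih =>
    intro pre acc fuel hsh hshacc hacc hf
    obtain ⟨f, rfl⟩ : ∃ f, fuel = f + 1 := ⟨fuel - 1, by omega⟩
    obtain ⟨a, b, rfl⟩ := hsh _ List.mem_cons_self
    have hget : (pre ++ ([a, b] :: rest) ++ acc)[pre.length]? = some [a, b] := by
      rw [List.append_assoc, List.getElem?_append_right (by omega)]
      simp
    have hsh' : pvShape rest := fun p hp => hsh p (List.mem_cons_of_mem _ hp)
    rw [pvLoop2_step c f pre.length _ a b hget]
    by_cases hc : a > c ∧ c - (a - c) ≥ 0 ∧ b ≥ 0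
    · rw [if_pos hc]
      have hmx : pvMirrorsOf c [a, b] = [[c - (a - c), b]] := by
        rw [pvMirrorsOf_pair, if_pos hc]
      have hmrest : pvMirrors c ([a, b] :: rest) = [c - (a - c), b] :: pvMirrors c rest := by
        simp [pvMirrors, List.flatMap_cons, hmx]
      have hacc' : pvMirrors c (acc ++ [[c - (a - c), b]]) = [] := by
        rw [pvMirrors_append, hacc]
        simp [pvMirrors, pvMirrorsOf_mirror c a b hc.1]
      have hih := ih (pre ++ [[a, b]]) (acc ++ [[c - (a - c), b]]) f hsh'
        (pvShape_append_pair acc _ _ hshacc) hacc'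
        (by rw [hmrest] at hf; simp only [List.length_cons, List.length_append,
              List.length_nil] at hf ⊢; omega)
      have harr1 : pre ++ ([a, b] :: rest) ++ acc ++ [[c - (a - c), b]]
          = (pre ++ [[a, b]]) ++ rest ++ (acc ++ [[c - (a - c), b]]) := by simp
      have harr2 : pre.length + 1 = (pre ++ [[a, b]]).length := by simp
      rw [harr1, harr2, hih, hmrest]
      simp
    · rw [if_neg hc]
      have hmx : pvMirrorsOf c [a, b] = [] := by
        rw [pvMirrorsOf_pair, if_neg hc]
      have hmrest : pvMirrors c ([a, b] :: rest) = pvMirrors c rest := by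
        simp [pvMirrors, List.flatMap_cons, hmx]
      have hih := ih (pre ++ [[a, b]]) acc f hsh' hshacc hacc
        (by rw [hmrest] at hf; simp only [List.length_cons] at hf; omega)
      have harr1 : pre ++ ([a, b] :: rest) ++ acc
          = (pre ++ [[a, b]]) ++ rest ++ acc := by simp
      have harr2 : pre.length + 1 = (pre ++ [[a, b]]).length := by simp
      rw [harr1, harr2, hih, hmrest]

-- ===== A's per-row column sequence, and its equality with B's interleaved ranges =====

-- the columns the inner j-step contributes (given row ≥ 0)
def pvPairCols (c_col j : Int) : List Int :=
  (if c_col - j ≥ 0 then [c_col - j] else []) ++ (if c_col + j ≥ 0 then [c_col + j] else [])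

def pvColsA (c_col k : Int) : List Int :=
  (if c_col ≥ 0 then [c_col] else []) ++
    (PySem.List.pyRange 1 (k + 1) 1).flatMap (pvPairCols c_col)

def pvColsB (c_col k : Int) : List Int :=
  (if c_col ≥ 0 then [c_col] else []) ++
    pvInterleave (PySem.List.pyRange (c_col - 1) (max (c_col - k - 1) (-1)) (-1))
                 (PySem.List.pyRange (max (c_col + 1) 0) (c_col + k + 1) 1)

theorem pvInterleave_nil (b : List Int) : pvInterleave [] b = b := by
  rw [pvInterleave]

theorem pvInterleave_cons (x : Int) (t b : List Int) :
    pvInterleave (x :: t) b = x :: pvInterleave b t := by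
  rw [pvInterleave]

-- core: the interleaved filtered ranges equal A's j-ordered flatMap
theorem pvInterleave_ranges (c_col : Int) :
    ∀ (K : Nat) (j : Int), 1 ≤ j →
      (PySem.List.pyRange j (j + K) 1).flatMap (pvPairCols c_col) =
      pvInterleave (PySem.List.pyRange (c_col - j) (max (c_col - j - K) (-1)) (-1))
                   (PySem.List.pyRange (max (c_col + j) 0) (c_col + j + K) 1) := by
  intro K
  induction K with
  | zero =>
    intro j hj
    rw [PySem.List.pyRange_one_eq_nil (by omega),
        PySem.List.pyRange_neg_one_eq_nil (by omega),
        PySem.List.pyRange_one_eq_nil (by omega)]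
    rw [pvInterleave_nil]
    simp
  | succ K ih =>
    intro j hj
    have hcast : (↑(K + 1) : Int) = (K : Int) + 1 := by push_cast; ring
    rw [hcast]
    rw [PySem.List.pyRange_one_cons (by omega)]
    rw [List.flatMap_cons]
    have hrest := ih (j + 1) (by omega)
    have e1 : j + 1 + (K : Int) = j + ((K : Int) + 1) := by ring
    rw [e1] at hrest
    by_cases h1 : c_col - j ≥ 0
    · -- left head kept; then c_col ≥ j ≥ 1 so right head kept too
      have h2 : c_col + j ≥ 0 := by omega
      have hL : PySem.List.pyRange (c_col - j) (max (c_col - j - ((K : Int) + 1)) (-1)) (-1)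
          = (c_col - j) :: PySem.List.pyRange (c_col - j - 1) (max (c_col - j - ((K : Int) + 1)) (-1)) (-1) := by
        rw [PySem.List.pyRange_neg_one_cons (by omega)]
      have hR : PySem.List.pyRange (max (c_col + j) 0) (c_col + j + ((K : Int) + 1)) 1
          = (c_col + j) :: PySem.List.pyRange (c_col + j + 1) (c_col + j + ((K : Int) + 1)) 1 := by
        rw [max_eq_left (by omega), PySem.List.pyRange_one_cons (by omega)]
      rw [hL, hR, pvInterleave_cons, pvInterleave_cons]
      have hg : pvPairCols c_col j = [c_col - j, c_col + j] := by
        unfold pvPairCols; rw [if_pos h1, if_pos h2]; rfl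
      rw [hg, hrest]
      have eL2 : max (c_col - (j + 1) - (K : Int)) (-1) = max (c_col - j - ((K : Int) + 1)) (-1) := by
        congr 1; ring
      have eL : c_col - (j + 1) = c_col - j - 1 := by ring
      have eR2 : c_col + (j + 1) + (K : Int) = c_col + j + ((K : Int) + 1) := by ring
      have eR1 : max (c_col + (j + 1)) 0 = c_col + j + 1 := by
        rw [max_eq_left (by omega)]; ring
      rw [eL2, eL, eR2, eR1]
      simp
    · -- left empty
      have hLnil : PySem.List.pyRange (c_col - j) (max (c_col - j - ((K : Int) + 1)) (-1)) (-1) = [] := by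
        rw [PySem.List.pyRange_neg_one_eq_nil (by omega)]
      have hLnil' : PySem.List.pyRange (c_col - (j + 1)) (max (c_col - (j + 1) - (K : Int)) (-1)) (-1) = [] := by
        rw [PySem.List.pyRange_neg_one_eq_nil (by omega)]
      rw [hLnil, pvInterleave_nil]
      rw [hLnil', pvInterleave_nil] at hrest
      by_cases h2 : c_col + j ≥ 0
      · have hR : PySem.List.pyRange (max (c_col + j) 0) (c_col + j + ((K : Int) + 1)) 1
            = (c_col + j) :: PySem.List.pyRange (c_col + j + 1) (c_col + j + ((K : Int) + 1)) 1 := by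
          rw [max_eq_left (by omega), PySem.List.pyRange_one_cons (by omega)]
        have hg : pvPairCols c_col j = [c_col + j] := by
          unfold pvPairCols; rw [if_neg h1, if_pos h2]; rfl
        rw [hR, hg, hrest]
        have eR2 : c_col + (j + 1) + (K : Int) = c_col + j + ((K : Int) + 1) := by ring
        have eR1 : max (c_col + (j + 1)) 0 = c_col + j + 1 := by
          rw [max_eq_left (by omega)]; ring
        rw [eR2, eR1]
        simp
      · have hg : pvPairCols c_col j = [] := by
          unfold pvPairCols; rw [if_neg h1, if_neg h2]; rfl
        rw [hg, hrest]
        have eR2 : c_col + (j + 1) + (K : Int) = c_col + j + ((K : Int) + 1) := by ring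
        have eR1 : max (c_col + (j + 1)) 0 = 0 := by rw [max_eq_right (by omega)]
        have eR1' : max (c_col + j) 0 = 0 := by rw [max_eq_right (by omega)]
        rw [eR2, eR1, eR1']
        simp

theorem pvColsA_eq_pvColsB (c_col k : Int) : pvColsA c_col k = pvColsB c_col k := by
  unfold pvColsA pvColsB
  congr 1
  by_cases hk : k ≤ 0
  · rw [PySem.List.pyRange_one_eq_nil (by omega),
        PySem.List.pyRange_neg_one_eq_nil (by omega),
        PySem.List.pyRange_one_eq_nil (by omega)]
    rw [pvInterleave_nil]
    simp
  · have hK : k = ((k.toNat : Int)) := by omega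
    have h := pvInterleave_ranges c_col k.toNat 1 (by omega)
    have e1 : (1 : Int) + (k.toNat : Int) = k + 1 := by omega
    have e2 : c_col - 1 - (k.toNat : Int) = c_col - k - 1 := by omega
    have e3 : c_col + 1 + (k.toNat : Int) = c_col + k + 1 := by omega
    rw [e1, e2, e3] at h
    exact h

theorem pvColsA_nonneg (c_col k : Int) : ∀ x ∈ pvColsA c_col k, 0 ≤ x := by
  intro x hx
  unfold pvColsA at hx
  rcases List.mem_append.mp hx with h | h
  · split at h <;> simp_all
  · obtain ⟨j, _, hj⟩ := List.mem_flatMap.mp h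
    unfold pvPairCols at hj
    rcases List.mem_append.mp hj with h' | h' <;> (split at h' <;> simp_all)

-- mirrors of a whole row block
theorem pvMirrors_block (c row : Int) (cols : List Int) (h : ∀ x ∈ cols, 0 ≤ x) :
    pvMirrors c (cols.map (fun cc => [row, cc])) =
      if row > c ∧ 2 * c - row ≥ 0 then cols.map (fun cc => [2 * c - row, cc]) else [] := by
  induction cols with
  | nil => simp [pvMirrors]
  | cons x t ih =>
    have hx : 0 ≤ x := h x List.mem_cons_self
    have ht := ih (fun y hy => h y (List.mem_cons_of_mem _ hy))
    simp only [List.map_cons, pvMirrors, List.flatMap_cons] at *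
    rw [pvMirrorsOf_pair]
    by_cases hc : row > c ∧ 2 * c - row ≥ 0
    · rw [if_pos ⟨hc.1, by omega, by omega⟩, if_pos hc, ht, if_pos hc]
      have e : c - (row - c) = 2 * c - row := by ring
      simp [e]
    · rw [if_neg (by intro h3; exact hc ⟨h3.1, by omega⟩), if_neg hc, ht, if_neg hc]
      simp

-- A's outer step appends exactly the row block of pvColsA
theorem pvStepAI_eq (lng c c_col : Int) (L : List (List Int)) (i : Int) :
    pvStepAI lng c c_col L i =
      if c + (i - 1) ≥ 0 then
        L ++ (pvColsA c_col (lng - i)).map (fun cc => [c + (i - 1), cc])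
      else L := by
  have hstep : pvStepAJ c c_col i = fun (L : List (List Int)) j =>
      L ++ ((if c + (i - 1) ≥ 0 ∧ c_col - j ≥ 0 then [[c + (i - 1), c_col - j]] else []) ++
            (if c + (i - 1) ≥ 0 ∧ c_col + j ≥ 0 then [[c + (i - 1), c_col + j]] else [])) := by
    funext L j
    unfold pvStepAJ
    split_ifs <;> simp
  unfold pvStepAI
  rw [hstep, PySem.List.foldl_append_eq_flatMap]
  by_cases hr : c + (i - 1) ≥ 0
  · rw [if_pos hr]
    have hg : ∀ j : Int,
        ((if c + (i - 1) ≥ 0 ∧ c_col - j ≥ 0 then [[c + (i - 1), c_col - j]] else []) ++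
         (if c + (i - 1) ≥ 0 ∧ c_col + j ≥ 0 then [[c + (i - 1), c_col + j]] else []))
        = (pvPairCols c_col j).map (fun cc => [c + (i - 1), cc]) := by
      intro j
      unfold pvPairCols
      by_cases h1 : c_col - j ≥ 0 <;> by_cases h2 : c_col + j ≥ 0
      · rw [if_pos ⟨hr, h1⟩, if_pos ⟨hr, h2⟩, if_pos h1, if_pos h2]; rfl
      · rw [if_pos ⟨hr, h1⟩, if_neg (fun h => h2 h.2), if_pos h1, if_neg h2]; rfl
      · rw [if_neg (fun h => h1 h.2), if_pos ⟨hr, h2⟩, if_neg h1, if_pos h2]; rfl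
      · rw [if_neg (fun h => h1 h.2), if_neg (fun h => h2 h.2), if_neg h1, if_neg h2]; rfl
    have hcenter : (if c + (i - 1) ≥ 0 ∧ c_col ≥ 0 then L ++ [[c + (i - 1), c_col]] else L)
        = L ++ (if c_col ≥ 0 then [c_col] else []).map (fun cc => [c + (i - 1), cc]) := by
      by_cases h0 : c_col ≥ 0 <;> simp [h0, hr]
    rw [hcenter]
    unfold pvColsA
    rw [List.map_append, List.map_flatMap, List.append_assoc]
    congr 1
    congr 1
    apply List.flatMap_congr  -- pointwise rewrite of the emitted segment
    intro j _
    exact hg j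
  · rw [if_neg hr]
    have hc : ¬ (c + (i - 1) ≥ 0 ∧ c_col ≥ 0) := fun h => hr h.1
    rw [if_neg hc]
    have : ((PySem.List.pyRange 1 (lng - i + 1) 1).flatMap fun j =>
        ((if c + (i - 1) ≥ 0 ∧ c_col - j ≥ 0 then [[c + (i - 1), c_col - j]] else []) ++
         (if c + (i - 1) ≥ 0 ∧ c_col + j ≥ 0 then [[c + (i - 1), c_col + j]] else []))) = [] := by
      apply List.flatMap_eq_nil_iff.mpr
      intro j _
      rw [if_neg (fun h => hr h.1), if_neg (fun h => hr h.1)]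
      rfl
    rw [this, List.append_nil]

-- one outer step: B's pair tracks (A's list, its mirrors)
theorem pvStep_pair (lng c c_col : Int) (L : List (List Int)) (i : Int) :
    pvStepB lng c c_col (L, pvMirrors c L) i =
      (pvStepAI lng c c_col L i, pvMirrors c (pvStepAI lng c c_col L i)) := by
  rw [pvStepAI_eq]
  unfold pvStepB
  have erow : c + i - 1 = c + (i - 1) := by ring
  by_cases hr : c + (i - 1) ≥ 0
  · rw [if_neg (by omega), if_pos hr]
    have hcols := pvColsA_eq_pvColsB c_col (lng - i)
    have hcolsB : ((if c_col ≥ 0 then [c_col] else []) ++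
        pvInterleave (PySem.List.pyRange (c_col - 1) (max (c_col - (lng - i) - 1) (-1)) (-1))
                     (PySem.List.pyRange (max (c_col + 1) 0) (c_col + (lng - i) + 1) 1))
        = pvColsA c_col (lng - i) := by
      rw [hcols]; rfl
    simp only [erow, hcolsB]
    rw [pvMirrors_append, pvMirrors_block c (c + (i - 1)) _ (pvColsA_nonneg c_col (lng - i))]
    by_cases hm : c + (i - 1) > c ∧ 2 * c - (c + (i - 1)) ≥ 0
    · rw [if_pos hm, if_pos hm]
    · rw [if_neg hm, if_neg hm, List.append_nil]
  · rw [if_pos (by omega), if_neg hr]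

-- outer fold: equality of states plus the shape invariant on A's list
theorem pvOuter_eq (lng c c_col : Int) (is : List Int) :
    ∀ L, pvShape L →
      (is.foldl (pvStepB lng c c_col) (L, pvMirrors c L)) =
      (is.foldl (pvStepAI lng c c_col) L, pvMirrors c (is.foldl (pvStepAI lng c c_col) L))
      ∧ pvShape (is.foldl (pvStepAI lng c c_col) L) := by
  induction is with
  | nil => intro L hL; exact ⟨rfl, hL⟩
  | cons i is ih =>
    intro L hL
    simp only [List.foldl_cons]
    rw [pvStep_pair]
    have hsh : pvShape (pvStepAI lng c c_col L i) := by
      rw [pvStepAI_eq]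
      split_ifs
      · exact pvShape_append_map L _ _ hL
      · exact hL
    exact ih _ hsh

-- ===== VERDICT (by name: the statement is the Claim_ definition above) =====
theorem portee_spec : Claim_equal_portee := by
  intro longueur centre _ hpre
  unfold Pre_portee at hpre
  match centre with
  | [] => simp at hpre
  | [_] => simp at hpre
  | c_lig :: c_col :: rest =>
    have h0 : PySem.List.pyGet? (c_lig :: c_col :: rest) 0 = some c_lig := by
      simp [pysem]
    have h1 : PySem.List.pyGet? (c_lig :: c_col :: rest) 1 = some c_col := by
      simp [PySem.List.pyGet?, PySem.List.pyIdx?]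
    unfold Spec_portee portee portee_alt
    simp only [h0, h1]
    have houter := pvOuter_eq longueur c_lig c_col
      (PySem.List.pyRange 1 (longueur + 1) 1) [] (by intro p hp; simp at hp)
    set LA := (PySem.List.pyRange 1 (longueur + 1) 1).foldl (pvStepAI longueur c_lig c_col) [] with hLA
    have hB : (PySem.List.pyRange 1 (longueur + 1) 1).foldl (pvStepB longueur c_lig c_col) ([], [])
        = (LA, pvMirrors c_lig LA) := by
      have h2 : (([], []) : List (List Int) × List (List Int)) = ([], pvMirrors c_lig []) := by
        simp [pvMirrors]
      rw [h2]
      exact houter.1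
    have hloop := pvLoop2_spec c_lig LA [] [] (2 * LA.length + 1) houter.2
      (by intro p hp; simp at hp) (by rfl)
      (by have := pvMirrors_length_le c_lig LA
          simp only [List.length_nil]; omega)
    simp only [List.nil_append, List.append_nil, List.length_nil] at hloop
    rw [hloop, hB]
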